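-- pv_equiv track=rewrite | github.com/zhangyh9/lock-club-website | scripts/iot-optimizer/run-optimizer.py | get_next_task
-- ===== SOURCE A (Python) =====
-- def get_next_task(status, pool_v2=None):
--     """获取下一个最高优先级可执行任务"""
--     tasks = status.get("tasks", {})
--
--     # 按优先级排序
--     priority_order = {"P0": 0, "P1": 1, "P2": 2}
--
--     pending = []
--     for task_id, task in tasks.items():
--         if task.get("status") == "pending":
--             priority = task.get("priority", "P2")
--
--             # 检查是否可自动执行（从pool_v2读取）
--             auto_exec = True
--             if pool_v2:
--                 v2_task = pool_v2.get("tasks", {}).get(task_id, {})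
--                 if not v2_task.get("autoExecutable", True):
--                     auto_exec = False
--
--             pending.append((priority_order.get(priority, 3), task_id, task, auto_exec))
--
--     # 按优先级排序，只取可执行的
--     pending.sort(key=lambda x: x[0])
--
--     # 找第一个可执行的
--     for item in pending:
--         if item[3]:  # auto_exec
--             return item[1], item[2]
--
--     return None, None
-- ===== SOURCE B (Python) =====
-- def get_next_task(status, pool_v2=None):
--     """Bucket pending auto-executable tasks by priority level; no sort."""
--     order = {"P0": 0, "P1": 1, "P2": 2}
--     v2_tasks = {}
--     if pool_v2:
--         v2_tasks = pool_v2.get("tasks", {})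
--     buckets = [[], [], [], []]
--     for task_id, task in status.get("tasks", {}).items():
--         if task.get("status") != "pending":
--             continue
--         if pool_v2 and not v2_tasks.get(task_id, {}).get("autoExecutable", True):
--             continue
--         buckets[order.get(task.get("priority", "P2"), 3)].append((task_id, task))
--     for b in buckets:
--         if b:
--             return b[0]
--     return None, None
-- ===== Notes on version B (the rewrite author's own statement) =====
-- stated objective: alternative
-- what changed: B replaces A's collect-all-pending, stable-sort-by-priority-rank, then scan-for-first-executable pipeline by one sort-free pass that filters out non-auto-executable tasks immediately and buckets the rest into the four priority-rank lists, returning the head of the first non-empty bucket.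
import Mathlib
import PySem

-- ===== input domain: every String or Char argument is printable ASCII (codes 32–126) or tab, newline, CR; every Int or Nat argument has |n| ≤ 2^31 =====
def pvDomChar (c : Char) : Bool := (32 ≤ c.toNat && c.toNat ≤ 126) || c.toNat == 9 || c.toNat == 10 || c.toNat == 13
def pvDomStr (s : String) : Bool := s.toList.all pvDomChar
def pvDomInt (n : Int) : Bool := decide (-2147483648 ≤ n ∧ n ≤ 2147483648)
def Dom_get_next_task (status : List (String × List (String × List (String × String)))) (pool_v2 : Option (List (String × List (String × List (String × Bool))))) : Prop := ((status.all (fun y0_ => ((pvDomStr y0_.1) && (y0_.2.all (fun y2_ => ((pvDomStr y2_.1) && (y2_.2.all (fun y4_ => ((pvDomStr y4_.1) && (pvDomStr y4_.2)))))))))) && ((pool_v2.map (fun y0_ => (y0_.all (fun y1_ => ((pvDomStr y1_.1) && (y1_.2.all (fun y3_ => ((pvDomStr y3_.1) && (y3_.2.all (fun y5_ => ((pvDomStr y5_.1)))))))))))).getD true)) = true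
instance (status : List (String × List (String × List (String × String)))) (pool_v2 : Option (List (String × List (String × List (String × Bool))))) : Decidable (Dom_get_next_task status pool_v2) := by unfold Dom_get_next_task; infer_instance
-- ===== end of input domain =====

-- B replaces A's build-sort-scan (collect all pending tasks, stable-sort by priority rank, scan for
-- the first auto-executable one) by a single sort-free pass that drops non-executable tasks up front
-- and buckets the rest by priority rank, then returns the head of the first non-empty bucket.

-- ===== PORT A =====
def get_next_task (status : List (String × List (String × List (String × String)))) (pool_v2 : Option (List (String × List (String × List (String × Bool))))) : Option String × (Option (List (String × String))) :=
  let tasks : List (String × List (String × String)) := (PySem.Dict.ofList status).getD "tasks" []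
  let priority_order : PySem.Dict String Int := PySem.Dict.ofList [("P0", 0), ("P1", 1), ("P2", 2)]
  let pending : List (Int × String × List (String × String) × Bool) :=
    (PySem.Dict.ofList tasks).items.foldl (fun pending p =>
      if (PySem.Dict.ofList p.2).get? "status" == some "pending" then
        let priority := (PySem.Dict.ofList p.2).getD "priority" "P2"
        let auto_exec : Bool :=
          match pool_v2 with
          | none => true
          | some pl =>
            if pl.isEmpty then true
            else
              let v2_task : List (String × Bool) :=
                (PySem.Dict.ofList ((PySem.Dict.ofList pl).getD "tasks" [])).getD p.1 []
              if !((PySem.Dict.ofList v2_task).getD "autoExecutable" true) then false else true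
        pending ++ [(priority_order.getD priority 3, p.1, p.2, auto_exec)]
      else pending) []
  let sortedp := PySem.List.sorted pending (fun x => x.1)
  match sortedp.find? (fun item => item.2.2.2) with
  | some item => (some item.2.1, some item.2.2.1)
  | none => (none, none)

-- ===== PORT B =====
def get_next_task_alt (status : List (String × List (String × List (String × String)))) (pool_v2 : Option (List (String × List (String × List (String × Bool))))) : Option String × (Option (List (String × String))) :=
  let order : PySem.Dict String Int := PySem.Dict.ofList [("P0", 0), ("P1", 1), ("P2", 2)]
  let truthy : Bool := match pool_v2 with | none => false | some pl => !pl.isEmpty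
  let v2_tasks : PySem.Dict String (List (String × Bool)) :=
    if truthy then PySem.Dict.ofList ((PySem.Dict.ofList (pool_v2.getD [])).getD "tasks" []) else PySem.Dict.ofList []
  let bs :=
    (PySem.Dict.ofList ((PySem.Dict.ofList status).getD "tasks" [])).items.foldl
      (fun (bs : List (String × List (String × String)) × List (String × List (String × String)) × List (String × List (String × String)) × List (String × List (String × String))) p =>
        if !((PySem.Dict.ofList p.2).get? "status" == some "pending") then bs
        else if truthy && !((PySem.Dict.ofList (v2_tasks.getD p.1 [])).getD "autoExecutable" true) then bs
        else
          let k := order.getD ((PySem.Dict.ofList p.2).getD "priority" "P2") 3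
          if k = 0 then (bs.1 ++ [p], bs.2.1, bs.2.2.1, bs.2.2.2)
          else if k = 1 then (bs.1, bs.2.1 ++ [p], bs.2.2.1, bs.2.2.2)
          else if k = 2 then (bs.1, bs.2.1, bs.2.2.1 ++ [p], bs.2.2.2)
          else (bs.1, bs.2.1, bs.2.2.1, bs.2.2.2 ++ [p]))
      ([], [], [], [])
  match bs.1 with
  | p :: _ => (some p.1, some p.2)
  | [] => match bs.2.1 with
    | p :: _ => (some p.1, some p.2)
    | [] => match bs.2.2.1 with
      | p :: _ => (some p.1, some p.2)
      | [] => match bs.2.2.2 with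
        | p :: _ => (some p.1, some p.2)
        | [] => (none, none)

-- ===== PRECONDITION & SPEC =====
def Spec_get_next_task (status : List (String × List (String × List (String × String)))) (pool_v2 : Option (List (String × List (String × List (String × Bool))))) (out : Option String × (Option (List (String × String)))) : Prop := out = get_next_task_alt status pool_v2
instance (status : List (String × List (String × List (String × String)))) (pool_v2 : Option (List (String × List (String × List (String × Bool))))) (out : Option String × (Option (List (String × String)))) : Decidable (Spec_get_next_task status pool_v2 out) := by unfold Spec_get_next_task; infer_instance

-- ===== CLAIM (what is proved, stated in full; the proofs are below) =====
def Claim_equal_get_next_task : Prop := ∀ (status : List (String × List (String × List (String × String)))) (pool_v2 : Option (List (String × List (String × List (String × Bool))))), Dom_get_next_task status pool_v2 → Spec_get_next_task status pool_v2 (get_next_task status pool_v2)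

-- ===== LEMMAS AND PROOFS =====

-- shorthands for the element-wise tests both ports perform
def pvPend (p : String × List (String × String)) : Bool :=
  (PySem.Dict.ofList p.2).get? "status" == some "pending"

def pvKey (p : String × List (String × String)) : Int :=
  (PySem.Dict.ofList [("P0", (0:Int)), ("P1", 1), ("P2", 2)]).getD ((PySem.Dict.ofList p.2).getD "priority" "P2") 3

def pvAutoA (pool_v2 : Option (List (String × List (String × List (String × Bool))))) (p : String × List (String × String)) : Bool :=
  match pool_v2 with
  | none => true
  | some pl =>
    if pl.isEmpty then true
    else
      if !((PySem.Dict.ofList ((PySem.Dict.ofList ((PySem.Dict.ofList pl).getD "tasks" [])).getD p.1 [])).getD "autoExecutable" true) then false else true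

def pvTruthy (pool_v2 : Option (List (String × List (String × List (String × Bool))))) : Bool :=
  match pool_v2 with | none => false | some pl => !pl.isEmpty

def pvV2 (pool_v2 : Option (List (String × List (String × List (String × Bool))))) : PySem.Dict String (List (String × Bool)) :=
  if pvTruthy pool_v2 then PySem.Dict.ofList ((PySem.Dict.ofList (pool_v2.getD [])).getD "tasks" []) else PySem.Dict.ofList []

def pvG (pool_v2 : Option (List (String × List (String × List (String × Bool))))) (p : String × List (String × String)) : Bool :=
  (PySem.Dict.ofList ((pvV2 pool_v2).getD p.1 [])).getD "autoExecutable" true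

def pvTup (pool_v2 : Option (List (String × List (String × List (String × Bool))))) (p : String × List (String × String)) : Int × String × List (String × String) × Bool :=
  (pvKey p, p.1, p.2, pvAutoA pool_v2 p)

theorem pvAutoA_eq (pool_v2 : Option (List (String × List (String × List (String × Bool))))) (p : String × List (String × String)) :
    pvAutoA pool_v2 p = !(pvTruthy pool_v2 && !pvG pool_v2 p) := by
  cases pool_v2 with
  | none => rfl
  | some pl =>
    by_cases h : pl.isEmpty
    · simp [pvAutoA, pvTruthy, h]
    · simp only [pvAutoA, pvTruthy, pvG, pvV2, pvTruthy, h, Option.getD_some, Bool.not_false,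
        Bool.true_and, if_true]
      cases hg : (PySem.Dict.ofList ((PySem.Dict.ofList ((PySem.Dict.ofList pl).getD "tasks" [])).getD p.1 [])).getD "autoExecutable" true <;> simp

theorem pvKey_cases (p : String × List (String × String)) : pvKey p = 0 ∨ pvKey p = 1 ∨ pvKey p = 2 ∨ pvKey p = 3 := by
  have h : PySem.Dict.ofList [("P0", (0:Int)), ("P1", 1), ("P2", 2)] = PySem.Dict.mk [("P0", 0), ("P1", 1), ("P2", 2)] := by decide
  unfold pvKey
  rw [h]
  generalize (PySem.Dict.ofList p.2).getD "priority" "P2" = s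
  simp [PySem.Dict.getD, PySem.Dict.get?_mk_cons]
  split_ifs <;> simp [PySem.Dict.get?]

theorem insertBy_skip {α : Type} (before : α → α → Bool) (x : α) (g h : List α)
    (hg : ∀ y ∈ g, before x y = false) :
    PySem.List.insertBy before x (g ++ h) = g ++ PySem.List.insertBy before x h := by
  induction g with
  | nil => simp
  | cons y ys ih =>
    have hy : before x y = false := hg y (by simp)
    simp [PySem.List.insertBy, hy, ih (fun z hz => hg z (by simp [hz]))]

theorem insertBy_front {α : Type} (before : α → α → Bool) (x : α) (h : List α)
    (hh : ∀ y ∈ h, before x y = true) :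
    PySem.List.insertBy before x h = x :: h := by
  cases h with
  | nil => simp [PySem.List.insertBy]
  | cons y ys => simp [PySem.List.insertBy, hh y (by simp)]

theorem insertBy_last {α : Type} (before : α → α → Bool) (x : α) (g : List α)
    (hg : ∀ y ∈ g, before x y = false) :
    PySem.List.insertBy before x g = g ++ [x] := by
  have := insertBy_skip before x g [] hg
  simpa [PySem.List.insertBy] using this

-- a stable sort whose keys all lie in {0,1,2,3} is the concatenation of the four key-buckets
theorem sorted_bucket4 {α : Type} (key : α → Int) (l : List α)
    (h : ∀ x ∈ l, key x = 0 ∨ key x = 1 ∨ key x = 2 ∨ key x = 3) :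
    PySem.List.sorted l key =
      l.filter (fun x => key x == 0) ++ l.filter (fun x => key x == 1)
        ++ l.filter (fun x => key x == 2) ++ l.filter (fun x => key x == 3) := by
  rw [PySem.List.sorted_eq_foldl_insertBy]
  induction l using List.reverseRecOn with
  | nil => simp
  | append_singleton l x ih =>
    rw [List.foldl_append, List.foldl_cons, List.foldl_nil,
        ih (fun y hy => h y (by simp [hy]))]
    have hmem : ∀ (i : Int) (y : α), y ∈ l.filter (fun x => key x == i) → key y = i := by
      intro i y hy
      simpa using (List.of_mem_filter hy)
    have hfil : ∀ (i : Int), key x ≠ i → (l ++ [x]).filter (fun z => key z == i) = l.filter (fun z => key z == i) := by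
      intro i hne; simp [List.filter_append, hne]
    have hfil' : ∀ (i : Int), key x = i → (l ++ [x]).filter (fun z => key z == i) = l.filter (fun z => key z == i) ++ [x] := by
      intro i he; simp [List.filter_append, he]
    simp only [List.append_assoc]
    rcases h x (by simp) with hk | hk | hk | hk
    · rw [insertBy_skip _ _ _ _ (fun y hy => by simp [hmem 0 y hy, hk]),
          insertBy_front _ _ _ ?_]
      · rw [hfil' 0 hk, hfil 1 (by omega), hfil 2 (by omega), hfil 3 (by omega)]
        simp
      · intro y hy
        simp only [List.mem_append] at hy
        rcases hy with hy | hy | hy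
        · simp [hmem 1 y hy, hk]
        · simp [hmem 2 y hy, hk]
        · simp [hmem 3 y hy, hk]
    · rw [insertBy_skip _ _ _ _ (fun y hy => by simp [hmem 0 y hy, hk]),
          insertBy_skip _ _ _ _ (fun y hy => by simp [hmem 1 y hy, hk]),
          insertBy_front _ _ _ ?_]
      · rw [hfil 0 (by omega), hfil' 1 hk, hfil 2 (by omega), hfil 3 (by omega)]
        simp
      · intro y hy
        simp only [List.mem_append] at hy
        rcases hy with hy | hy
        · simp [hmem 2 y hy, hk]
        · simp [hmem 3 y hy, hk]
    · rw [insertBy_skip _ _ _ _ (fun y hy => by simp [hmem 0 y hy, hk]),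
          insertBy_skip _ _ _ _ (fun y hy => by simp [hmem 1 y hy, hk]),
          insertBy_skip _ _ _ _ (fun y hy => by simp [hmem 2 y hy, hk]),
          insertBy_front _ _ _ (fun y hy => by simp [hmem 3 y hy, hk])]
      rw [hfil 0 (by omega), hfil 1 (by omega), hfil' 2 hk, hfil 3 (by omega)]
      simp
    · rw [insertBy_skip _ _ _ _ (fun y hy => by simp [hmem 0 y hy, hk]),
          insertBy_skip _ _ _ _ (fun y hy => by simp [hmem 1 y hy, hk]),
          insertBy_skip _ _ _ _ (fun y hy => by simp [hmem 2 y hy, hk]),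
          insertBy_last _ _ _ (fun y hy => by simp [hmem 3 y hy, hk])]
      rw [hfil 0 (by omega), hfil 1 (by omega), hfil 2 (by omega), hfil' 3 hk]

-- proof-side refactorings of the two ports (definitionally equal to them)
def pvItems (status : List (String × List (String × List (String × String)))) : List (String × List (String × String)) :=
  (PySem.Dict.ofList ((PySem.Dict.ofList status).getD "tasks" [])).items

def pvAfold (pool_v2 : Option (List (String × List (String × List (String × Bool))))) (items : List (String × List (String × String))) : List (Int × String × List (String × String) × Bool) :=
  items.foldl (fun pending p => if pvPend p then pending ++ [pvTup pool_v2 p] else pending) []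

def pvBstep (pool_v2 : Option (List (String × List (String × List (String × Bool))))) (bs : List (String × List (String × String)) × List (String × List (String × String)) × List (String × List (String × String)) × List (String × List (String × String))) (p : String × List (String × String)) :
    List (String × List (String × String)) × List (String × List (String × String)) × List (String × List (String × String)) × List (String × List (String × String)) :=
  if !pvPend p then bs
  else if pvTruthy pool_v2 && !pvG pool_v2 p then bs
  else if pvKey p = 0 then (bs.1 ++ [p], bs.2.1, bs.2.2.1, bs.2.2.2)
  else if pvKey p = 1 then (bs.1, bs.2.1 ++ [p], bs.2.2.1, bs.2.2.2)
  else if pvKey p = 2 then (bs.1, bs.2.1, bs.2.2.1 ++ [p], bs.2.2.2)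
  else (bs.1, bs.2.1, bs.2.2.1, bs.2.2.2 ++ [p])

def pvBout (bs : List (String × List (String × String)) × List (String × List (String × String)) × List (String × List (String × String)) × List (String × List (String × String))) : Option String × (Option (List (String × String))) :=
  match bs.1 with
  | p :: _ => (some p.1, some p.2)
  | [] => match bs.2.1 with
    | p :: _ => (some p.1, some p.2)
    | [] => match bs.2.2.1 with
      | p :: _ => (some p.1, some p.2)
      | [] => match bs.2.2.2 with
        | p :: _ => (some p.1, some p.2)
        | [] => (none, none)

def pvBucket (pool_v2 : Option (List (String × List (String × List (String × Bool))))) (items : List (String × List (String × String))) (i : Int) : List (String × List (String × String)) :=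
  items.filter (fun p => pvPend p && (pvAutoA pool_v2 p && pvKey p == i))

theorem pvAfold_eq (pool_v2 : Option (List (String × List (String × List (String × Bool))))) (items : List (String × List (String × String))) :
    pvAfold pool_v2 items = (items.filter pvPend).map (pvTup pool_v2) := by
  unfold pvAfold
  simpa using PySem.List.foldl_append_if pvPend (pvTup pool_v2) items []

theorem pvBfold_eq (pool_v2 : Option (List (String × List (String × List (String × Bool))))) (items : List (String × List (String × String))) :
    ∀ b0 b1 b2 b3, items.foldl (pvBstep pool_v2) (b0, b1, b2, b3)
      = (b0 ++ pvBucket pool_v2 items 0, b1 ++ pvBucket pool_v2 items 1,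
         b2 ++ pvBucket pool_v2 items 2, b3 ++ pvBucket pool_v2 items 3) := by
  induction items with
  | nil => intro b0 b1 b2 b3; simp [pvBucket]
  | cons p t ih =>
    intro b0 b1 b2 b3
    rw [List.foldl_cons]
    by_cases hp : pvPend p
    · by_cases ha : pvAutoA pool_v2 p
      · have hskip : (pvTruthy pool_v2 && !pvG pool_v2 p) = false := by
          rw [pvAutoA_eq] at ha
          cases h : (pvTruthy pool_v2 && !pvG pool_v2 p)
          · rfl
          · rw [h] at ha; simp at ha
        rcases pvKey_cases p with hk | hk | hk | hk
        · simp only [pvBstep, hp, hskip, hk, Bool.not_true, Bool.false_eq_true, if_false, if_true]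
          rw [ih]
          simp [pvBucket, hp, ha, hk]
        · simp only [pvBstep, hp, hskip, hk, Bool.not_true, Bool.false_eq_true, if_false, if_true]
          rw [ih]
          simp [pvBucket, hp, ha, hk]
        · simp only [pvBstep, hp, hskip, hk, Bool.not_true, Bool.false_eq_true, if_false, if_true]
          rw [ih]
          simp [pvBucket, hp, ha, hk]
        · simp only [pvBstep, hp, hskip, hk, Bool.not_true, Bool.false_eq_true, if_false]
          rw [ih]
          simp [pvBucket, hp, ha, hk]
      · have hskip : (pvTruthy pool_v2 && !pvG pool_v2 p) = true := by
          have h := pvAutoA_eq pool_v2 p; rw [h] at ha; simpa using ha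
        simp only [pvBstep, hp, hskip, Bool.not_true, Bool.false_eq_true, if_false, if_true]
        rw [ih]
        simp [pvBucket, hp, ha]
    · simp only [pvBstep, hp, Bool.not_false, if_true]
      rw [ih]
      simp [pvBucket, hp]

theorem pvA_eq (pool_v2 : Option (List (String × List (String × List (String × Bool))))) (items : List (String × List (String × String))) :
    (match (PySem.List.sorted (pvAfold pool_v2 items) (fun x => x.1)).find? (fun item => item.2.2.2) with
     | some item => (some item.2.1, some item.2.2.1)
     | none => ((none : Option String), (none : Option (List (String × String)))))
    = pvBout (pvBucket pool_v2 items 0, pvBucket pool_v2 items 1, pvBucket pool_v2 items 2, pvBucket pool_v2 items 3) := by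
  rw [pvAfold_eq]
  rw [sorted_bucket4 (fun (x : Int × String × List (String × String) × Bool) => x.1)
        ((items.filter pvPend).map (pvTup pool_v2)) (by
    intro x hx
    obtain ⟨p, _, rfl⟩ := List.mem_map.1 hx
    exact pvKey_cases p)]
  have hfm : ∀ (i : Int), ((items.filter pvPend).map (pvTup pool_v2)).filter (fun x => x.1 == i)
      = (((items.filter pvPend).filter (fun p => pvKey p == i)).map (pvTup pool_v2)) := by
    intro i; exact List.filter_map
  rw [hfm 0, hfm 1, hfm 2, hfm 3]
  rw [List.find?_append, List.find?_append, List.find?_append]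
  have hbk : ∀ (i : Int),
      (((items.filter pvPend).filter (fun p => pvKey p == i)).map (pvTup pool_v2)).find? (fun item => item.2.2.2)
      = (pvBucket pool_v2 items i).head?.map (pvTup pool_v2) := by
    intro i
    rw [List.find?_map]
    show (((items.filter pvPend).filter (fun p => pvKey p == i)).find? (fun p => pvAutoA pool_v2 p)).map (pvTup pool_v2)
      = (pvBucket pool_v2 items i).head?.map (pvTup pool_v2)
    rw [← List.head?_filter, List.filter_filter, List.filter_filter]
    congr 1
    apply congrArg
    apply List.filter_congr
    intro x _
    cases pvPend x <;> cases pvAutoA pool_v2 x <;> cases pvKey x == i <;> rfl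
  rw [hbk 0, hbk 1, hbk 2, hbk 3]
  cases pvBucket pool_v2 items 0 <;> cases pvBucket pool_v2 items 1 <;>
    cases pvBucket pool_v2 items 2 <;> cases pvBucket pool_v2 items 3 <;>
    simp [pvBout, pvTup]

-- ===== VERDICT (by name: the statement is the Claim_ definition above) =====
theorem get_next_task_spec : Claim_equal_get_next_task := by
  intro status pool_v2 _
  unfold Spec_get_next_task
  have hA : get_next_task status pool_v2
      = (match (PySem.List.sorted (pvAfold pool_v2 (pvItems status)) (fun x => x.1)).find? (fun item => item.2.2.2) with
         | some item => (some item.2.1, some item.2.2.1)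
         | none => ((none : Option String), (none : Option (List (String × String))))) := rfl
  have hB : get_next_task_alt status pool_v2
      = pvBout ((pvItems status).foldl (pvBstep pool_v2) ([], [], [], [])) := rfl
  rw [hA, hB, pvA_eq, pvBfold_eq]
  simp
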